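-- pv_equiv track=rewrite | github.com/definfo/OS-Course-Lab | Lab0/phase_4.py | decrypt_method1
-- ===== SOURCE A (Python) =====
-- def decrypt_method1(s):
--     """
--     反向重排字符串
--     """
--     n = len(s)
--     mid = (n + 1) // 2
--     result = [''] * n
--
--     # 还原偶数位置
--     for i in range(mid):
--         result[i*2] = s[i]
--
--     # 还原奇数位置
--     for i in range(n - mid):
--         result[i*2 + 1] = s[mid + i]
--
--     return ''.join(result)
-- ===== SOURCE B (Python) =====
-- def decrypt_method1(s):
--     """
--     反向重排字符串
--     """
--     mid = (len(s) + 1) // 2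
--     first, second = s[:mid], s[mid:]
--     pairs = [a + b for a, b in zip(first, second)]
--     if len(first) > len(second):
--         pairs.append(first[-1])
--     return ''.join(pairs)
-- ===== Notes on version B (the rewrite author's own statement) =====
-- stated objective: idiomatic
-- what changed: Replaces the two index-arithmetic passes that fill even then odd slots of a preallocated list with a single pairing pass: zip the two halves, flatten the pairs, and append the leftover middle character for odd length.
import Mathlib
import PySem

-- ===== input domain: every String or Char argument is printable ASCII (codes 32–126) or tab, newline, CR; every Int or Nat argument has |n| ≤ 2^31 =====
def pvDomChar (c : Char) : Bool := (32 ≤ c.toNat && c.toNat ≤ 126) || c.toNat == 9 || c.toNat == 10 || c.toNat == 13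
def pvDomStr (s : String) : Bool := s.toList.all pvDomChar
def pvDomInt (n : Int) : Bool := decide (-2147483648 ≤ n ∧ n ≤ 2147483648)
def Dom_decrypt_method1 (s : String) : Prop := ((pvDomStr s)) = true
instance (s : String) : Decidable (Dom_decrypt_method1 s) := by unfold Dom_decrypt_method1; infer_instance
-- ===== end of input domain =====

-- B rebuilds the string by zipping the two halves and flattening the pairs (one pairing pass)
-- instead of A's two index-arithmetic passes over a preallocated slot list; objective: idiomatic.

-- ===== PORT A =====
-- Each slot of `result` is a Python string, here a List Char ('' = []); ''.join = flatten.
-- The list-index assignments are always in range, so pySetD/pyGetD are exact here.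
def decrypt_method1 (s : String) : String :=
  let cs := s.toList
  let n : Int := PySem.List.len cs
  let mid : Int := PySem.Int.floordiv (n + 1) 2
  let result : List (List Char) := List.replicate n.toNat []
  let r1 := (PySem.List.pyRange 0 mid 1).foldl
      (fun r i => PySem.List.pySetD r (i * 2) [PySem.List.pyGetD cs i ' ']) result
  let r2 := (PySem.List.pyRange 0 (n - mid) 1).foldl
      (fun r i => PySem.List.pySetD r (i * 2 + 1) [PySem.List.pyGetD cs (mid + i) ' ']) r1
  String.mk r2.flatten

-- ===== PORT B =====
-- pairs are two-character strings (List Char); first[-1] is pyGetD _ (-1).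
def decrypt_method1_alt (s : String) : String :=
  let cs := s.toList
  let mid : Int := PySem.Int.floordiv (PySem.List.len cs + 1) 2
  let first := PySem.List.slice cs none (some mid)
  let second := PySem.List.slice cs (some mid) none
  let pairs := (first.zip second).map (fun p => [p.1, p.2])
  let pairs' := if PySem.List.len second < PySem.List.len first
      then pairs ++ [[PySem.List.pyGetD first (-1) ' ']] else pairs
  String.mk pairs'.flatten

-- ===== PRECONDITION & SPEC =====
def Spec_decrypt_method1 (s : String) (out : String) : Prop := out = decrypt_method1_alt s
instance (s : String) (out : String) : Decidable (Spec_decrypt_method1 s out) := by unfold Spec_decrypt_method1; infer_instance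

-- ===== CLAIM (what is proved, stated in full; the proofs are below) =====
def Claim_equal_decrypt_method1 : Prop := ∀ (s : String), Dom_decrypt_method1 s → Spec_decrypt_method1 s (decrypt_method1 s)

-- ===== LEMMAS AND PROOFS =====

-- interleave two lists, first-biased (proof-only characterisation of both ports)
def itl : List Char → List Char → List Char
  | [], ys => ys
  | x :: xs, ys =>
    match ys with
    | [] => x :: itl xs []
    | y :: ys' => x :: y :: itl xs ys'

theorem itl_length : ∀ (f s : List Char), (itl f s).length = f.length + s.length := by
  intro f
  induction f with
  | nil => intro s; simp [itl]
  | cons x xs ih =>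
    intro s
    cases s with
    | nil => simp [itl, ih]
    | cons y ys => simp [itl, ih]; omega

theorem itl_getElem? : ∀ (f s : List Char), s.length ≤ f.length → f.length ≤ s.length + 1 →
    ∀ (j : Nat), (itl f s)[j]? = if j % 2 = 0 then f[j / 2]? else s[j / 2]? := by
  intro f
  induction f with
  | nil =>
    intro s hs _ j
    have : s = [] := by cases s <;> simp_all
    subst this
    simp [itl]
  | cons x xs ih =>
    intro s hs hf j
    cases s with
    | nil =>
      have : xs = [] := by cases xs <;> simp_all
      subst this
      match j with
      | 0 => simp [itl]
      | 1 => simp [itl]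
      | (m + 2) =>
        have h1 : (m + 2) / 2 = m / 2 + 1 := by omega
        simp [itl, h1]
    | cons y ys =>
      match j with
      | 0 => simp [itl]
      | 1 => simp [itl]
      | (m + 2) =>
        have h1 : (m + 2) / 2 = m / 2 + 1 := by omega
        have h2 : (m + 2) % 2 = m % 2 := by omega
        simp only [itl, List.getElem?_cons_succ, h1, h2]
        rw [ih ys (by simpa using hs) (by simpa using hf) m]

theorem flatten_map_singleton : ∀ (l : List Char), (l.map (fun c => [c])).flatten = l := by
  intro l; induction l <;> simp_all

-- the length of a foldl of sets is the base length
theorem length_foldl_set {α : Type} (h : Nat → Nat) (g : Nat → α) :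
    ∀ (l : List Nat) (r : List α),
      (l.foldl (fun r k => r.set (h k) (g k)) r).length = r.length := by
  intro l
  induction l with
  | nil => intro r; simp
  | cons a l ih => intro r; simp [ih]

-- what a pass writing g k at positions 2k+c leaves at position j
theorem foldl_set_stride {α : Type} (c : Nat) (g : Nat → α) :
    ∀ (m : Nat) (r : List α) (j : Nat),
      ((List.range m).foldl (fun r k => r.set (2 * k + c) (g k)) r)[j]? =
        if j % 2 = c % 2 ∧ (j - c) / 2 < m ∧ c ≤ j ∧ j < r.length
        then some (g ((j - c) / 2)) else r[j]? := by
  intro m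
  induction m with
  | zero =>
    intro r j
    simp only [List.range_zero, List.foldl_nil]
    rw [if_neg (by omega)]
  | succ m ih =>
    intro r j
    rw [List.range_succ, List.foldl_append]
    simp only [List.foldl_cons, List.foldl_nil]
    rw [List.getElem?_set, length_foldl_set (fun k => 2 * k + c) g, ih r j]
    by_cases hj : 2 * m + c = j
    · rw [if_pos hj]
      by_cases hr : 2 * m + c < r.length
      · rw [if_pos hr, if_pos ⟨by omega, by omega, by omega, by omega⟩]
        have hix : (j - c) / 2 = m := by omega
        rw [hix]
      · rw [if_neg hr, if_neg (by omega), List.getElem?_eq_none (by omega)]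
    · rw [if_neg hj]
      by_cases hc : j % 2 = c % 2 ∧ (j - c) / 2 < m ∧ c ≤ j ∧ j < r.length
      · rw [if_pos hc, if_pos ⟨hc.1, by omega, hc.2.2⟩]
      · rw [if_neg hc, if_neg (fun h => hc ⟨h.1, by omega, h.2.2.1, h.2.2.2⟩)]

-- B's pair list flattens to itl
theorem B_flat : ∀ (f s : List Char), s.length ≤ f.length → f.length ≤ s.length + 1 →
    (if (s.length : Int) < (f.length : Int)
      then (f.zip s).map (fun p => [p.1, p.2]) ++ [[PySem.List.pyGetD f (-1) ' ']]
      else (f.zip s).map (fun p => [p.1, p.2])).flatten = itl f s := by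
  intro f
  induction f with
  | nil =>
    intro s hs _
    have : s = [] := by cases s <;> simp_all
    subst this; simp [itl]
  | cons x xs ih =>
    intro s hs hf
    cases s with
    | nil =>
      have : xs = [] := by cases xs <;> simp_all
      subst this
      rw [if_pos (by simp)]
      have hx : PySem.List.pyGetD [x] (-1) ' ' = x := by
        rw [PySem.List.pyGetD_neg_one [x] ' ' (by simp)]
        simp
      simp [itl, hx]
    | cons y ys =>
      have hlen : ys.length ≤ xs.length := by simpa using hs
      have hlen2 : xs.length ≤ ys.length + 1 := by simpa using hf
      have hiff : ((ys.length : Int) < (xs.length : Int)) ↔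
          (((y :: ys).length : Int) < ((x :: xs).length : Int)) := by simp
      have hih := ih ys hlen hlen2
      by_cases hc : (ys.length : Int) < (xs.length : Int)
      · have hxs : xs ≠ [] := by
          intro h
          subst h
          simp at hc
          omega
        rw [if_pos (hiff.mp hc)]
        have hget : PySem.List.pyGetD (x :: xs) (-1) ' ' = PySem.List.pyGetD xs (-1) ' ' := by
          rw [PySem.List.pyGetD_neg_one (x :: xs) ' ' (List.cons_ne_nil x xs),
              PySem.List.pyGetD_neg_one xs ' ' hxs, List.getLast_cons hxs]
        rw [if_pos hc] at hih
        simp only [List.zip_cons_cons, List.map_cons, List.cons_append, List.flatten_cons, hget]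
        rw [hih]
        simp [itl]
      · rw [if_neg (fun h => hc (hiff.mpr h))]
        rw [if_neg hc] at hih
        simp only [List.zip_cons_cons, List.map_cons, List.flatten_cons]
        rw [hih]
        simp [itl]

-- A's slot list is itl mapped to singletons
theorem A_slots (cs : List Char) :
    (PySem.List.pyRange 0 (PySem.List.len cs - PySem.Int.floordiv (PySem.List.len cs + 1) 2) 1).foldl
      (fun r i => PySem.List.pySetD r (i * 2 + 1)
        [PySem.List.pyGetD cs (PySem.Int.floordiv (PySem.List.len cs + 1) 2 + i) ' '])
      ((PySem.List.pyRange 0 (PySem.Int.floordiv (PySem.List.len cs + 1) 2) 1).foldl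
        (fun r i => PySem.List.pySetD r (i * 2) [PySem.List.pyGetD cs i ' '])
        (List.replicate (PySem.List.len cs).toNat []))
    = (itl (cs.take ((cs.length + 1) / 2)) (cs.drop ((cs.length + 1) / 2))).map (fun c => [c]) := by
  have hn : PySem.List.len cs = (cs.length : Int) := by simp
  have hmid : PySem.Int.floordiv (PySem.List.len cs + 1) 2
      = (((cs.length + 1) / 2 : Nat) : Int) := by
    rw [hn, PySem.Int.floordiv_eq_ediv_of_pos (by omega)]
    omega
  rw [hmid, hn]
  generalize hM : (cs.length + 1) / 2 = M
  have hMle : M ≤ cs.length := by omega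
  set N := cs.length with hN
  have hsub : (N : Int) - (M : Int) = ((N - M : Nat) : Int) := by omega
  have range_cast : ∀ (m : Nat), PySem.List.pyRange 0 (m : Int) 1
      = (List.range m).map (fun (k : Nat) => ((k : Nat) : Int)) := by
    intro m
    rw [PySem.List.pyRange_one]
    simp only [sub_zero, Int.toNat_natCast]
    apply List.map_congr_left
    intro k _
    omega
  rw [hsub, range_cast M, range_cast (N - M), List.foldl_map, List.foldl_map]
  have hfe : (fun (r : List (List Char)) (k : Nat) =>
        PySem.List.pySetD r ((k : Int) * 2) [PySem.List.pyGetD cs (k : Int) ' '])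
      = (fun r k => r.set (2 * k + 0) [PySem.List.pyGetD cs (k : Int) ' ']) := by
    funext r k
    rw [PySem.List.pySetD_of_nonneg _ _ (by positivity)]
    congr 1
    omega
  have hfo : (fun (r : List (List Char)) (k : Nat) =>
        PySem.List.pySetD r ((k : Int) * 2 + 1) [PySem.List.pyGetD cs ((M : Int) + k) ' '])
      = (fun r k => r.set (2 * k + 1) [PySem.List.pyGetD cs ((M : Int) + k) ' ']) := by
    funext r k
    rw [PySem.List.pySetD_of_nonneg _ _ (by positivity)]
    congr 1
    omega
  rw [hfe, hfo]
  apply List.ext_getElem?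
  intro j
  rw [foldl_set_stride 1 (fun k => [PySem.List.pyGetD cs ((M : Int) + k) ' ']),
      length_foldl_set (fun k => 2 * k + 0) _,
      foldl_set_stride 0 (fun k => [PySem.List.pyGetD cs ((k : Nat) : Int) ' '])]
  have hres_len : (List.replicate ((N : Int)).toNat ([] : List Char)).length = N := by simp
  rw [hres_len]
  have hitl := itl_getElem? (cs.take M) (cs.drop M) (by simp; omega) (by simp; omega) j
  have hitl_len : (itl (cs.take M) (cs.drop M)).length = N := by
    rw [itl_length]; simp; omega
  by_cases hjN : j < N
  · by_cases hpar : j % 2 = 0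
    · have hj2 : j / 2 < M := by omega
      rw [if_neg (by omega), if_pos ⟨by omega, by omega, by omega, hjN⟩,
          List.getElem?_map, hitl, if_pos hpar, List.getElem?_take_of_lt hj2,
          PySem.List.pyGetD_natCast]
      have hj2N : j / 2 < N := by omega
      simp [List.getD_eq_getElem?_getD, List.getElem?_eq_getElem hj2N]
    · have hj2 : (j - 1) / 2 < N - M := by omega
      rw [if_pos ⟨by omega, hj2, by omega, hjN⟩, List.getElem?_map, hitl, if_neg hpar,
          List.getElem?_drop]
      have hMj : M + j / 2 < N := by omega
      have hcast : (M : Int) + (((j - 1) / 2 : Nat) : Int) = ((M + j / 2 : Nat) : Int) := by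
        push_cast; omega
      rw [hcast, PySem.List.pyGetD_natCast]
      simp [List.getD_eq_getElem?_getD, List.getElem?_eq_getElem hMj]
  · rw [if_neg (by omega), if_neg (by omega),
        List.getElem?_eq_none (l := List.replicate _ _) (by simp; omega),
        List.getElem?_eq_none (by simp [hitl_len]; omega)]

-- ===== VERDICT (by name: the statement is the Claim_ definition above) =====
theorem decrypt_method1_spec : Claim_equal_decrypt_method1 := by
  intro s _
  unfold Spec_decrypt_method1
  show decrypt_method1 s = decrypt_method1_alt s
  simp only [decrypt_method1, decrypt_method1_alt]
  have hmid : PySem.Int.floordiv (PySem.List.len s.toList + 1) 2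
      = (((s.toList.length + 1) / 2 : Nat) : Int) := by
    have hn : PySem.List.len s.toList = (s.toList.length : Int) := by simp
    rw [hn, PySem.Int.floordiv_eq_ediv_of_pos (by omega)]
    omega
  rw [A_slots s.toList, hmid, PySem.List.slice_to_natCast, PySem.List.slice_from_natCast]
  have hB := B_flat (s.toList.take ((s.toList.length + 1) / 2))
      (s.toList.drop ((s.toList.length + 1) / 2)) (by simp; omega) (by simp; omega)
  simp only [PySem.List.len_eq]
  refine congrArg String.mk ?_
  rw [flatten_map_singleton]
  exact hB.symm
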